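-- pv_equiv track=rewrite | github.com/JakeSaunders1995/comp16321MarkingMid | CW_spell/spellcheck_w92704dw/spellcheck_w92704dw.py | parse
-- ===== SOURCE A (Python) =====
-- def parse(string):
--     words = []
--     temp = ''
--
--     for i in range(len(string)):
--         if(string[i] == ' '):
--             if(temp != ''):
--                 words.append(temp)
--                 temp = ''
--                 continue
--         else:
--             temp += string[i]
--
--     if(temp != ''):
--         words.append(temp)
--
--     return words
-- ===== SOURCE B (Python) =====
-- def parse(string):
--     return [w for w in string.split(' ') if w != '']
-- ===== Notes on version B (the rewrite author's own statement) =====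
-- stated objective: idiomatic
-- what changed: Replaces A's explicit character-scan state machine with a running accumulator by the builtin single-space split followed by filtering out empty pieces.
import Mathlib
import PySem

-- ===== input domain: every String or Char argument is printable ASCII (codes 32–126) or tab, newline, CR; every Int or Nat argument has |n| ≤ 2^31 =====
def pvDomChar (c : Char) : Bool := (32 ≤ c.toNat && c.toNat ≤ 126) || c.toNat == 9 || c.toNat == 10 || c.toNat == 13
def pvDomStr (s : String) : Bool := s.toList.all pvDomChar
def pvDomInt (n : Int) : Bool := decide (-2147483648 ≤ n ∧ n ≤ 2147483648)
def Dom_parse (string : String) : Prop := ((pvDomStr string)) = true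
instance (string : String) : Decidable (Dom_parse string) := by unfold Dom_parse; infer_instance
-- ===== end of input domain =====

-- B replaces A's explicit character-scan accumulator loop by split(' ') plus a filter of empty pieces (idiomatic; same cost).


-- ===== PORT A =====
-- A scans the characters in order keeping (words, temp); temp is kept as List Char
-- (the PySem convention for string building) and turned into a String when appended.
def parse (string : String) : List String :=
  let st := string.toList.foldl
    (fun (st : List String × List Char) c =>
      if c = ' ' then
        if st.2 ≠ [] then (st.1 ++ [String.ofList st.2], []) else st
      else (st.1, st.2 ++ [c])) ([], [])
  if st.2 ≠ [] then st.1 ++ [String.ofList st.2] else st.1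

-- ===== PORT B =====
-- [w for w in string.split(' ') if w != '']; split? is some since the separator " " is nonempty.
def parse_alt (string : String) : List String :=
  ((PySem.Str.split? string " ").getD []).filter (fun w => w ≠ "")

-- ===== PRECONDITION & SPEC =====
def Spec_parse (string : String) (out : List String) : Prop := out = parse_alt string
instance (string : String) (out : List String) : Decidable (Spec_parse string out) := by unfold Spec_parse; infer_instance

-- ===== CLAIM (what is proved, stated in full; the proofs are below) =====
def Claim_equal_parse : Prop := ∀ (string : String), Dom_parse string → Spec_parse string (parse string)

-- ===== LEMMAS AND PROOFS =====

-- reference: the space-separated nonempty words of cs, with pending accumulator temp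
def pvWords (temp : List Char) : List Char → List (List Char)
  | [] => if temp ≠ [] then [temp] else []
  | c :: rest =>
    if c = ' ' then (if temp ≠ [] then [temp] else []) ++ pvWords [] rest
    else pvWords (temp ++ [c]) rest

-- structural version of PySem.Chars.splitOn.go for the one-char separator [' ']
def pvGo (cur : List Char) : List Char → List (List Char)
  | [] => [cur.reverse]
  | c :: rest => if c = ' ' then cur.reverse :: pvGo [] rest else pvGo (c :: cur) rest

-- A's loop body and its post-loop finalisation, named so the proofs can talk about them
def pvStep (st : List String × List Char) (c : Char) : List String × List Char :=
  if c = ' ' then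
    if st.2 ≠ [] then (st.1 ++ [String.ofList st.2], []) else st
  else (st.1, st.2 ++ [c])

def pvFin (st : List String × List Char) : List String :=
  if st.2 ≠ [] then st.1 ++ [String.ofList st.2] else st.1

lemma go_eq_pvGo (l : List Char) : ∀ (fuel : Nat) (cur : List Char) (acc : List (List Char)),
    l.length ≤ fuel →
    PySem.Chars.splitOn.go [' '] fuel l cur acc = acc.reverse ++ pvGo cur l := by
  induction l with
  | nil =>
    intro fuel cur acc _
    cases fuel <;> simp [PySem.Chars.splitOn.go, pvGo]
  | cons c rest ih =>
    intro fuel cur acc hf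
    cases fuel with
    | zero => simp at hf
    | succ n =>
      by_cases hc : c = ' '
      · subst hc
        rw [show PySem.Chars.splitOn.go [' '] (n+1) (' ' :: rest) cur acc
              = PySem.Chars.splitOn.go [' '] n rest [] (cur.reverse :: acc) from by
            simp [PySem.Chars.splitOn.go, List.isPrefixOf]]
        rw [ih n [] (cur.reverse :: acc) (by simpa using hf)]
        simp [pvGo]
      · rw [show PySem.Chars.splitOn.go [' '] (n+1) (c :: rest) cur acc
              = PySem.Chars.splitOn.go [' '] n rest (c :: cur) acc from by
            simp [PySem.Chars.splitOn.go, List.isPrefixOf, Ne.symm hc]]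
        rw [ih n (c :: cur) acc (by simpa using Nat.lt_succ_iff.mp (by simpa using hf))]
        simp [pvGo, hc]

lemma filter_pvGo (l : List Char) : ∀ cur : List Char,
    (pvGo cur l).filter (fun p => p ≠ []) = pvWords cur.reverse l := by
  induction l with
  | nil =>
    intro cur
    by_cases h : cur.reverse = [] <;> simp [pvGo, pvWords, h]
  | cons c rest ih =>
    intro cur
    by_cases hc : c = ' '
    · subst hc
      have hrest := ih []
      simp only [ne_eq, decide_not] at hrest ⊢
      by_cases h : cur.reverse = [] <;> simp [pvGo, pvWords, h, hrest]
    · have hrest := ih (c :: cur)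
      simp only [ne_eq, decide_not] at hrest ⊢
      simp [pvGo, pvWords, hc, hrest]

lemma fold_eq_pvWords (l : List Char) : ∀ (words : List String) (temp : List Char),
    pvFin (l.foldl pvStep (words, temp)) = words ++ (pvWords temp l).map String.ofList := by
  induction l with
  | nil =>
    intro words temp
    by_cases h : temp = [] <;> simp [pvFin, pvWords, h]
  | cons c rest ih =>
    intro words temp
    simp only [List.foldl_cons]
    by_cases hc : c = ' '
    · subst hc
      by_cases h : temp = []
      · simp only [pvStep, h, ne_eq, not_true_eq_false, ite_false, if_true]
        rw [ih]
        simp [pvWords]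
      · rw [show pvStep (words, temp) ' ' = (words ++ [String.ofList temp], []) from by simp [pvStep, h]]
        rw [ih]
        simp [pvWords, h]
    · rw [show pvStep (words, temp) c = (words, temp ++ [c]) from by simp [pvStep, hc]]
      rw [ih]
      simp [pvWords, hc]

lemma filter_map_ofList (ps : List (List Char)) :
    (ps.map String.ofList).filter (fun w => w ≠ "") = (ps.filter (fun p => p ≠ [])).map String.ofList := by
  induction ps with
  | nil => rfl
  | cons p rest ih =>
    simp only [ne_eq, decide_not] at ih ⊢
    by_cases h : p = []
    · subst h; simp [ih]
    · have hne : String.ofList p ≠ "" := by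
        intro he
        exact h (by simpa using congrArg String.toList he)
      simp [hne, h, ih]

-- ===== VERDICT (by name: the statement is the Claim_ definition above) =====
theorem parse_spec : Claim_equal_parse := by
  intro s _
  unfold Spec_parse parse_alt
  have hA : parse s = pvFin (s.toList.foldl pvStep ([], [])) := rfl
  rw [hA, fold_eq_pvWords]
  have h1 : PySem.Str.split? s " " = some ((pvGo [] s.toList).map String.ofList) := by
    unfold PySem.Str.split? PySem.Chars.split? PySem.Chars.splitOn
    rw [show (" ".toList : List Char) = [' '] from rfl,
      go_eq_pvGo s.toList (s.toList.length + 1) [] [] (by omega)]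
    simp
  rw [h1]
  simp only [Option.getD_some]
  rw [filter_map_ofList, filter_pvGo]
  simp
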